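-- pv_equiv track=rewrite | github.com/rymdhund/aoc-2019 | day04/run.py | valid
-- ===== SOURCE A (Python) =====
-- def valid(pw):
--     same = False
--     last = None
--     for i in range(6):
--         d = (pw // (10 ** i)) % 10
--
--         if last != None and last == d:
--             same = True
--
--         if last != None and last < d:
--             return False
--
--         last = d
--
--     return same
-- ===== SOURCE B (Python) =====
-- def valid(pw):
--     ds = [(pw // 10 ** i) % 10 for i in range(5, -1, -1)]
--     return ds == sorted(ds) and len(set(ds)) < 6
-- ===== Notes on version B (the rewrite author's own statement) =====
-- stated objective: simpler
-- what changed: Replaced the stateful digit loop with early return (same/last flags) by building the 6-digit list once and checking it equals its sorted version (non-decreasing) and has a duplicate via set cardinality.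
import Mathlib
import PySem

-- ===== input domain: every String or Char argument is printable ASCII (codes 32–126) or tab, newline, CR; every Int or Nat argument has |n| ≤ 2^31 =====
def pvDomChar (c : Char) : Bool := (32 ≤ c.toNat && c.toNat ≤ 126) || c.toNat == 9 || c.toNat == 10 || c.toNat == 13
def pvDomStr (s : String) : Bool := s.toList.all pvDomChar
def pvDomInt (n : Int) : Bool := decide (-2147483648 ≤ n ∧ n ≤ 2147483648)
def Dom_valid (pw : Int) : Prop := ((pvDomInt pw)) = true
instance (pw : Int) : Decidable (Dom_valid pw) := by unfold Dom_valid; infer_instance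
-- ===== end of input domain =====

-- B is a simpler re-implementation: it builds the six digits once and checks
-- "non-decreasing" (list equals its sorted version) and "has a repeat" (set smaller
-- than the list), instead of A's stateful loop with an early return.

-- (pw // 10 ** i) % 10, the subexpression both Pythons share; i.toNat is exact here
-- because both loops only pass i ∈ {0,…,5}.
def pyDigit (pw : Int) (i : Int) : Int :=
  PySem.Int.mod (PySem.Int.floordiv pw ((10 : Int) ^ i.toNat)) 10

-- ===== PORT A =====
-- the body of A's `for i in range(6)` loop, with state (same, last); early
-- `return False` is the `false` branch of the match.
def validLoop (pw : Int) : List Int → Bool → Option Int → Bool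
  | [], same, _ => same
  | i :: rest, same, last =>
    let d : Int := pyDigit pw i
    let same' : Bool := if last = some d then true else same
    match last with
    | some l => if l < d then false else validLoop pw rest same' (some d)
    | none => validLoop pw rest same' (some d)

def valid (pw : Int) : Bool :=
  validLoop pw (PySem.List.pyRange 0 6 1) false none

-- ===== PORT B =====
def valid_alt (pw : Int) : Bool :=
  let ds : List Int := (PySem.List.pyRange 5 (-1) (-1)).map (fun i => pyDigit pw i)
  decide (ds = PySem.List.sorted ds (fun x => x) false)
    && decide ((PySem.Set.ofList ds).length < 6)

-- ===== PRECONDITION & SPEC =====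
def Spec_valid (pw : Int) (out : Bool) : Prop := out = valid_alt pw
instance (pw : Int) (out : Bool) : Decidable (Spec_valid pw out) := by unfold Spec_valid; infer_instance

-- ===== CLAIM (what is proved, stated in full; the proofs are below) =====
def Claim_equal_valid : Prop := ∀ (pw : Int), Dom_valid pw → Spec_valid pw (valid pw)

-- ===== LEMMAS AND PROOFS =====

theorem pyRangeA_eq : PySem.List.pyRange 0 6 1 = [0, 1, 2, 3, 4, 5] := by decide

theorem pyRangeB_eq : PySem.List.pyRange 5 (-1) (-1) = [5, 4, 3, 2, 1, 0] := by decide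

theorem sorted_self_iff (l : List Int) :
    (l = PySem.List.sorted l (fun x => x) false) ↔ l.Pairwise (· ≤ ·) := by
  constructor
  · intro h
    have := PySem.List.sorted_pairwise (xs := l) (key := fun x => x)
    rw [← h] at this
    simpa using this
  · intro h
    exact (PySem.List.sorted_eq_self_of_pairwise l (fun x => x) (by simpa using h)).symm

theorem ofList_length_eq (l : List Int) :
    (PySem.Set.ofList l).length = l.dedup.length := by
  have hperm : (PySem.Set.ofList l).Perm l.dedup := by
    rw [List.perm_ext_iff_of_nodup (PySem.Set.nodup_ofList l) l.nodup_dedup]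
    intro x
    simp [PySem.Set.mem_ofList, List.mem_dedup]
  exact hperm.length_eq

theorem ofList_length_lt_iff (l : List Int) :
    (PySem.Set.ofList l).length < l.length ↔ ¬ l.Nodup := by
  rw [ofList_length_eq]
  constructor
  · intro h hn
    rw [List.dedup_eq_self.2 hn] at h
    omega
  · intro hn
    have hsub := l.dedup_sublist
    have hle := hsub.length_le
    rcases lt_or_eq_of_le hle with h | h
    · exact h
    · exact absurd (List.dedup_eq_self.1 (hsub.eq_of_length h)) hn

theorem ofList6_lt_iff (a b c d e f : Int) :
    ((PySem.Set.ofList [a, b, c, d, e, f]).length < 6) ↔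
      ¬ ([a, b, c, d, e, f] : List Int).Nodup := by
  simpa using ofList_length_lt_iff [a, b, c, d, e, f]

-- ===== VERDICT (by name: the statement is the Claim_ definition above) =====
set_option maxHeartbeats 2000000 in
theorem valid_spec : Claim_equal_valid := by
  intro pw _
  unfold Spec_valid valid valid_alt
  rw [pyRangeA_eq, pyRangeB_eq]
  simp only [List.map, validLoop]
  simp only [decide_eq_decide.mpr (sorted_self_iff _),
    decide_eq_decide.mpr (ofList6_lt_iff _ _ _ _ _ _)]
  simp only [List.pairwise_cons, List.nodup_cons, List.mem_cons]
  split_ifs <;> simp_all <;> omega
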